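-- pv_equiv track=rewrite | github.com/teodoraalexandra/Fundamental-Of-Programming | Assignment 1-3/Problem_13.py | nextPrimeDiv
-- ===== SOURCE A (Python) =====
-- def isPrime(a):
--     if a <= 1:
--         return False
--     if a == 2:
--         return True
--     for i in range(2, a):   #from 2 to a we check every number to see if it is a possible divisor
--         if (a % i == 0):
--             return False   #if we find a divisor, the number is not prime
--     return True
--
-- def nextPrimeDiv(n, d):
--     next = d + 1
--     while (isPrime(next) == False or n % next != 0) and next <= n:
--         next = next + 1
--     if next <= n:
--         return next
--     else:
--         return -1
-- ===== SOURCE B (Python) =====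
-- def nextPrimeDiv(n, d):
--     # Trial-divide n up to sqrt(m): primes found in increasing order.
--     if n < 2:
--         return -1
--     m = n
--     p = 2
--     while p * p <= m:
--         if m % p == 0:
--             if p > d:
--                 return p
--             while m % p == 0:
--                 m //= p
--         else:
--             p += 1
--     if m > 1 and m > d:
--         return m
--     return -1
-- ===== Notes on version B (the rewrite author's own statement) =====
-- stated objective: alternative
-- what changed: B factors n by trial division up to sqrt of the remaining cofactor, stripping prime factors <= d, instead of A's linear candidate scan that re-tests primality of each candidate with its own linear loop.
import Mathlib
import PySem

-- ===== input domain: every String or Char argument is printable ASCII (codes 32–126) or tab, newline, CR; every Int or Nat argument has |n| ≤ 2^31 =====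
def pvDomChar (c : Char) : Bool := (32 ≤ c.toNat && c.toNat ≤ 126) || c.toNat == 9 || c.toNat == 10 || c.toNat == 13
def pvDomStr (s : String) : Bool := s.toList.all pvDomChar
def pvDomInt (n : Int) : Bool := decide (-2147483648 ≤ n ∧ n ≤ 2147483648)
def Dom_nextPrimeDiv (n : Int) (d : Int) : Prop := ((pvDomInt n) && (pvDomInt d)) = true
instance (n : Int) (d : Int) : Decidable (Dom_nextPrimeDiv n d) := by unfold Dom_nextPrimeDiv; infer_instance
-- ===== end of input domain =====

-- B replaces A's linear candidate scan (with a trial-division primality test per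
-- candidate) by trial-division factorisation of n; objective: alternative algorithm.

-- ===== PORT A =====
-- isPrime(a)'s for-loop over range(2, a): i walks up, returning False at the first
-- divisor (the Nat fuel (a-2).toNat is exactly the number of range elements)
def isPrimeLoop : Nat → Int → Int → Bool
  | 0, _, _ => true
  | k + 1, a, i => if PySem.Int.mod a i == 0 then false else isPrimeLoop k a (i + 1)

def isPrimeA (a : Int) : Bool :=
  if a ≤ 1 then false
  else if a = 2 then true
  else isPrimeLoop (a - 2).toNat a 2

-- the while loop of nextPrimeDiv: next increases while the candidate is not a prime
-- divisor and next ≤ n (the Nat fuel only makes the recursion structural; the fuel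
-- supplied below exceeds the loop's iteration count, proved in aLoopF_ans)
def aLoopF : Nat → Int → Int → Int
  | 0, _, next => next
  | k + 1, n, next =>
    if ((!isPrimeA next || !(PySem.Int.mod n next == 0)) && decide (next ≤ n)) then
      aLoopF k n (next + 1)
    else next

def nextPrimeDiv (n : Int) (d : Int) : Int :=
  let nx := aLoopF ((n + 1 - (d + 1)).toNat + 1) n (d + 1)
  if nx ≤ n then nx else -1

-- ===== PORT B =====
-- inner while loop of B: divide out all factors p from m (fuel m.toNat suffices:
-- m strictly decreases at each division)
def stripBF : Nat → Int → Int → Int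
  | 0, m, _ => m
  | k + 1, m, p => if PySem.Int.mod m p = 0 then stripBF k (PySem.Int.floordiv m p) p else m

def stripB (m : Int) (p : Int) : Int := stripBF m.toNat m p

-- outer while loop of B (fuel again only bounds the iteration count)
def bLoopF : Nat → Int → Int → Int → Int
  | 0, m, _, _ => m
  | k + 1, m, p, d =>
    if p * p ≤ m then
      if PySem.Int.mod m p = 0 then
        if d < p then p
        else bLoopF k (stripB m p) p d
      else bLoopF k m (p + 1) d
    else
      if 1 < m ∧ d < m then m else -1

def nextPrimeDiv_alt (n : Int) (d : Int) : Int :=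
  if n < 2 then -1 else bLoopF ((n - 2).toNat + 1) n 2 d

-- ===== PRECONDITION & SPEC =====
def Spec_nextPrimeDiv (n : Int) (d : Int) (out : Int) : Prop := out = nextPrimeDiv_alt n d
instance (n : Int) (d : Int) (out : Int) : Decidable (Spec_nextPrimeDiv n d out) := by unfold Spec_nextPrimeDiv; infer_instance

-- ===== CLAIM (what is proved, stated in full; the proofs are below) =====
def Claim_equal_nextPrimeDiv : Prop := ∀ (n : Int) (d : Int), Dom_nextPrimeDiv n d → Spec_nextPrimeDiv n d (nextPrimeDiv n d)

-- ===== LEMMAS AND PROOFS =====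

-- the candidate test of A's while loop, as a Prop
def goodQ (n q : Int) : Prop := isPrimeA q = true ∧ PySem.Int.mod n q = 0

-- the common characterisation: r is the least good candidate in (d, n], else -1
def Ans (n d r : Int) : Prop :=
  (r = -1 ∧ ∀ q, d < q → q ≤ n → ¬ goodQ n q) ∨
  (d < r ∧ r ≤ n ∧ goodQ n r ∧ ∀ q, d < q → q < r → ¬ goodQ n q)

theorem isPrimeA_two_le {q : Int} (h : isPrimeA q = true) : 2 ≤ q := by
  unfold isPrimeA at h
  split_ifs at h <;> omega

theorem isPrimeLoop_iff (a : Int) : ∀ (k : Nat) (i : Int),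
    isPrimeLoop k a i = true ↔ ∀ j : Int, i ≤ j → j < i + k → ¬ j ∣ a := by
  intro k
  induction k with
  | zero =>
    intro i
    constructor
    · intro _ j h1 h2
      have : (0:Int) + i ≤ j := by omega
      omega
    · intro _; rfl
  | succ k ih =>
    intro i
    rw [isPrimeLoop]
    split_ifs with hmod
    · rw [beq_iff_eq, PySem.Int.mod_eq_zero_iff_dvd] at hmod
      simp only [Bool.false_eq_true, false_iff, not_forall]
      exact ⟨i, le_rfl, by push_cast; omega, by simpa using hmod⟩
    · rw [beq_iff_eq] at hmod
      rw [ih (i + 1)]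
      constructor
      · intro h j h1 h2
        by_cases hji : j = i
        · subst hji
          intro hd
          exact hmod ((PySem.Int.mod_eq_zero_iff_dvd a j).mpr hd)
        · exact h j (by omega) (by push_cast at h2 ⊢; omega)
      · intro h j h1 h2
        exact h j (by omega) (by push_cast at h2 ⊢; omega)

theorem isPrimeA_iff (q : Int) : isPrimeA q = true ↔ (2 ≤ q ∧ Prime q) := by
  unfold isPrimeA
  split_ifs with h1 h2
  · simp only [Bool.false_eq_true, false_iff, not_and]
    intro h; omega
  · subst h2; exact iff_of_true rfl ⟨by norm_num, Int.prime_two⟩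
  · have h3 : 2 ≤ q := by omega
    rw [isPrimeLoop_iff q ((q - 2).toNat) 2]
    constructor
    · intro hno
      refine ⟨h3, ?_⟩
      rw [Int.prime_iff_natAbs_prime, Nat.prime_def_lt]
      refine ⟨by omega, ?_⟩
      intro mm hmlt hmdvd
      by_contra hm1
      have hm0 : mm ≠ 0 := by
        rintro rfl
        rw [Nat.zero_dvd] at hmdvd
        omega
      apply hno (mm : Int) (by omega) (by push_cast; omega)
      have hcast : (mm : Int) ∣ ((q.natAbs : Nat) : Int) := Int.natCast_dvd_natCast.mpr hmdvd
      rwa [Int.natAbs_of_nonneg (by omega)] at hcast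
    · rintro ⟨-, hp⟩ i hi1 hi2 hmod
      have hi2' : i < q := by push_cast at hi2; omega
      have hd1 := Int.natAbs_dvd_natAbs.mpr hmod
      have := (Int.prime_iff_natAbs_prime.mp hp).eq_one_or_self_of_dvd _ hd1
      omega

theorem Ans_unique {n d r s : Int} (hr : Ans n d r) (hs : Ans n d s) : r = s := by
  rcases hr with ⟨hr1, hr2⟩ | ⟨hr1, hr2, hr3, hr4⟩ <;>
    rcases hs with ⟨hs1, hs2⟩ | ⟨hs1, hs2, hs3, hs4⟩
  · omega
  · exact absurd hs3 (hr2 s hs1 hs2)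
  · exact absurd hr3 (hs2 r hr1 hr2)
  · by_contra hne
    rcases lt_or_gt_of_ne hne with h | h
    · exact hs4 r hr1 h hr3
    · exact hr4 s hs1 h hs3

theorem two_le_of_prime_pos (q : Int) (hq : Prime q) (h0 : 0 < q) : 2 ≤ q := by
  have := (Int.prime_iff_natAbs_prime.mp hq).two_le
  omega

theorem prime_dvd_prime_eq (q m : Int) (hq : Prime q) (hm : Prime m) (hq0 : 0 < q)
    (hm0 : 0 < m) (h : q ∣ m) : q = m := by
  have h1 := Int.natAbs_dvd_natAbs.mpr h
  have h2 := (Int.prime_iff_natAbs_prime.mp hm).eq_one_or_self_of_dvd _ h1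
  have h3 := (Int.prime_iff_natAbs_prime.mp hq).two_le
  omega

theorem smallest_factor_prime (m p : Int) (hp : 2 ≤ p) (hpm : p ∣ m)
    (hminf : ∀ q : Int, Prime q → 0 < q → q ∣ m → p ≤ q) : Prime p := by
  by_contra hnp
  obtain ⟨q, hq, hqp⟩ := Int.exists_prime_and_dvd (n := p) (by omega : p.natAbs ≠ 1)
  have hq' : Prime ((q.natAbs : Int)) := by
    rw [Int.prime_iff_natAbs_prime, Int.natAbs_natCast]
    exact Int.prime_iff_natAbs_prime.mp hq
  have hqd : ((q.natAbs : Int)) ∣ p := Int.natAbs_dvd.mpr hqp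
  have h2 := (Int.prime_iff_natAbs_prime.mp hq).two_le
  have hle := Int.le_of_dvd (by omega) hqd
  have hge := hminf _ hq' (by omega) (hqd.trans hpm)
  have heq : ((q.natAbs : Int)) = p := by omega
  exact hnp (heq ▸ hq')

theorem aLoopF_ans (n d : Int) : ∀ (k : Nat) (next : Int), (n + 1 - next).toNat < k →
    d < next → (∀ q, d < q → q < next → ¬ goodQ n q) →
    Ans n d (if aLoopF k n next ≤ n then aLoopF k n next else -1) := by
  intro k
  induction k with
  | zero => intro next h; omega
  | succ k ih =>
    intro next hk hd hmin
    rw [aLoopF]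
    by_cases hc : ((!isPrimeA next || !(PySem.Int.mod n next == 0)) && decide (next ≤ n)) = true
    · rw [if_pos hc]
      simp only [Bool.and_eq_true, Bool.or_eq_true, Bool.not_eq_true', decide_eq_true_eq,
        beq_iff_eq, Bool.eq_false_iff, ne_eq] at hc
      obtain ⟨hbad, hle⟩ := hc
      have hnext : ¬ goodQ n next := by
        rintro ⟨hg1, hg2⟩
        rcases hbad with h | h
        · exact absurd hg1 (by simp [h])
        · exact h hg2
      exact ih (next + 1) (by omega) (by omega)
        (fun q h1 h2 => by
          rcases (by omega : q < next ∨ q = next) with h | h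
          · exact hmin q h1 h
          · exact h ▸ hnext)
    · rw [if_neg hc]
      simp only [Bool.and_eq_true, Bool.or_eq_true, Bool.not_eq_true', decide_eq_true_eq,
        beq_iff_eq, Bool.eq_false_iff, ne_eq, not_and] at hc
      by_cases hn : next ≤ n
      · have hb : ¬(¬isPrimeA next = true ∨ ¬PySem.Int.mod n next = 0) := fun hb => hc hb hn
        push_neg at hb
        rw [if_pos hn]
        right
        exact ⟨hd, hn, ⟨hb.1, hb.2⟩, hmin⟩
      · rw [if_neg hn]
        left
        exact ⟨rfl, fun q h1 h2 hg => hmin q h1 (by omega) hg⟩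

theorem ans_A (n d : Int) : Ans n d (nextPrimeDiv n d) := by
  unfold nextPrimeDiv
  exact aLoopF_ans n d ((n + 1 - (d + 1)).toNat + 1) (d + 1) (by omega) (by omega)
    (fun q h1 h2 _ => absurd h1 (by omega))

theorem stripBF_pos_le (p : Int) (hp : 2 ≤ p) : ∀ (f : Nat) (m : Int), 0 < m →
    0 < stripBF f m p ∧ stripBF f m p ≤ m := by
  intro f
  induction f with
  | zero => intro m hm; exact ⟨hm, le_refl m⟩
  | succ f ih =>
    intro m hm
    rw [stripBF]
    split_ifs with hmod
    · have hpm : p ∣ m := (PySem.Int.mod_eq_zero_iff_dvd m p).mp hmod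
      have h1 : PySem.Int.floordiv m p = m / p := PySem.Int.floordiv_eq_ediv_of_pos (by omega)
      have h2 : 0 < m / p := Int.ediv_pos_of_pos_of_dvd hm (by omega) hpm
      have h3 : m / p < m := by rw [Int.ediv_lt_iff_lt_mul (by omega)]; nlinarith
      have h4 := ih (PySem.Int.floordiv m p) (by omega)
      constructor
      · exact h4.1
      · omega
    · exact ⟨hm, le_refl m⟩

theorem stripB_lt (m p : Int) (hm : 0 < m) (hp : 2 ≤ p)
    (h : PySem.Int.mod m p = 0) : stripB m p < m := by
  obtain ⟨k, hk⟩ : ∃ k, m.toNat = k + 1 := ⟨m.toNat - 1, by omega⟩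
  unfold stripB
  rw [hk, stripBF, if_pos h]
  have hpm : p ∣ m := (PySem.Int.mod_eq_zero_iff_dvd m p).mp h
  have h1 : PySem.Int.floordiv m p = m / p := PySem.Int.floordiv_eq_ediv_of_pos (by omega)
  have h2 : 0 < m / p := Int.ediv_pos_of_pos_of_dvd hm (by omega) hpm
  have h3 : m / p < m := by rw [Int.ediv_lt_iff_lt_mul (by omega)]; nlinarith
  have h4 := stripBF_pos_le p hp k (PySem.Int.floordiv m p) (by omega)
  omega

theorem stripB_pos (m p : Int) (hm : 0 < m) (hp : 2 ≤ p) : 0 < stripB m p :=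
  (stripBF_pos_le p hp m.toNat m hm).1

theorem stripBF_dvd (p : Int) (hp : 2 ≤ p) : ∀ (f : Nat) (m : Int), 0 < m →
    stripBF f m p ∣ m := by
  intro f
  induction f with
  | zero => intro m _; exact dvd_rfl
  | succ f ih =>
    intro m hm
    rw [stripBF]
    split_ifs with hmod
    · have hpm : p ∣ m := (PySem.Int.mod_eq_zero_iff_dvd m p).mp hmod
      have h1 : PySem.Int.floordiv m p = m / p := PySem.Int.floordiv_eq_ediv_of_pos (by omega)
      have h2 : 0 < m / p := Int.ediv_pos_of_pos_of_dvd hm (by omega) hpm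
      have hdd : PySem.Int.floordiv m p ∣ m := by
        rw [h1]; exact ⟨p, (Int.ediv_mul_cancel hpm).symm⟩
      exact (ih (PySem.Int.floordiv m p) (by omega)).trans hdd
    · exact dvd_rfl

theorem stripB_dvd (m p : Int) (hm : 0 < m) (hp : 2 ≤ p) : stripB m p ∣ m :=
  stripBF_dvd p hp m.toNat m hm

theorem stripB_prime_dvd (p q : Int) (hp : 2 ≤ p) (hq : Prime q) (hqp : ¬ q ∣ p) :
    ∀ (f : Nat) (m : Int), 0 < m → q ∣ m → q ∣ stripBF f m p := by
  intro f
  induction f with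
  | zero => intro m _ h; exact h
  | succ f ih =>
    intro m hm hqm
    rw [stripBF]
    split_ifs with hmod
    · have hpm : p ∣ m := (PySem.Int.mod_eq_zero_iff_dvd m p).mp hmod
      have h1 : PySem.Int.floordiv m p = m / p := PySem.Int.floordiv_eq_ediv_of_pos (by omega)
      have h2 : 0 < m / p := Int.ediv_pos_of_pos_of_dvd hm (by omega) hpm
      apply ih (PySem.Int.floordiv m p) (by omega)
      rw [h1]
      have hmeq : m = p * (m / p) := (Int.mul_ediv_cancel' hpm).symm
      rcases hq.dvd_mul.mp (hmeq ▸ hqm) with h' | h'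
      · exact absurd h' hqp
      · exact h'
    · exact hqm

theorem exit_prime (m p : Int) (hm2 : 2 ≤ m) (hpp : m < p * p) (hp2 : 2 ≤ p)
    (hminf : ∀ q : Int, Prime q → 0 < q → q ∣ m → p ≤ q) : Prime m := by
  by_contra hnm
  have hnatm : ¬ Nat.Prime m.natAbs := fun h => hnm (Int.prime_iff_natAbs_prime.mpr h)
  have hf_prime : Nat.Prime m.natAbs.minFac := Nat.minFac_prime (by omega)
  have hf_dvd : m.natAbs.minFac ∣ m.natAbs := Nat.minFac_dvd _
  have hf_sq : m.natAbs.minFac ^ 2 ≤ m.natAbs := Nat.minFac_sq_le_self (by omega) hnatm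
  have hfI : Prime ((m.natAbs.minFac : Int)) := by
    rw [Int.prime_iff_natAbs_prime, Int.natAbs_natCast]; exact hf_prime
  have hfd : ((m.natAbs.minFac : Int)) ∣ m := by
    have h0 : ((m.natAbs.minFac : Int)) ∣ ((m.natAbs : Nat) : Int) :=
      Int.natCast_dvd_natCast.mpr hf_dvd
    rwa [Int.natAbs_of_nonneg (by omega)] at h0
  have hge := hminf _ hfI (by exact_mod_cast hf_prime.pos) hfd
  have hmabs : ((m.natAbs : Nat) : Int) = m := Int.natAbs_of_nonneg (by omega)
  have hsq : ((m.natAbs.minFac : Int)) ^ 2 ≤ m := by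
    rw [← hmabs]; exact_mod_cast hf_sq
  nlinarith

theorem bLoopF_ans (n d : Int) (hn2 : 2 ≤ n) : ∀ (k : Nat) (m p : Int), (m - p).toNat < k →
    1 ≤ m → 2 ≤ p → m ∣ n →
    (∀ q : Int, Prime q → 0 < q → q ∣ m → p ≤ q) →
    (∀ q : Int, Prime q → 0 < q → d < q → (q ∣ n ↔ q ∣ m)) →
    Ans n d (bLoopF k m p d) := by
  intro k
  induction k with
  | zero => intro m p h; omega
  | succ k ih =>
    intro m p hk hm1 hp2 hmn hminf htrans
    rw [bLoopF]
    split_ifs with hg hmod hdp hret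
    · -- p divides m and d < p: the smallest prime divisor of n above d is p
      have hpm : p ∣ m := (PySem.Int.mod_eq_zero_iff_dvd m p).mp hmod
      have hp_prime : Prime p := smallest_factor_prime m p hp2 hpm hminf
      have hpn : p ∣ n := hpm.trans hmn
      right
      refine ⟨hdp, Int.le_of_dvd (by omega) hpn,
        ⟨(isPrimeA_iff p).mpr ⟨hp2, hp_prime⟩, (PySem.Int.mod_eq_zero_iff_dvd n p).mpr hpn⟩, ?_⟩
      rintro q h1 h2 ⟨hq1, hq2⟩
      obtain ⟨hq2le, hqp⟩ := (isPrimeA_iff q).mp hq1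
      have hqm : q ∣ m := (htrans q hqp (by omega) h1).mp ((PySem.Int.mod_eq_zero_iff_dvd n q).mp hq2)
      have := hminf q hqp (by omega) hqm
      omega
    · -- p divides m but p ≤ d: strip all factors p and continue
      have hpm : p ∣ m := (PySem.Int.mod_eq_zero_iff_dvd m p).mp hmod
      have hpltm : p < m := by nlinarith
      have hlt : stripB m p < m := stripB_lt m p (by omega) hp2 hmod
      have hpos : 0 < stripB m p := stripB_pos m p (by omega) hp2
      have hsd : stripB m p ∣ m := stripB_dvd m p (by omega) hp2
      apply ih (stripB m p) p (by omega) (by omega) hp2 (hsd.trans hmn)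
      · exact fun q hq hq0 hqd => hminf q hq hq0 (hqd.trans hsd)
      · intro q hq hq0 hqd
        constructor
        · intro hqn
          have hqm : q ∣ m := (htrans q hq hq0 hqd).mp hqn
          have hqnep : ¬ q ∣ p := by
            intro hqp'
            have := Int.le_of_dvd (by omega) hqp'
            omega
          exact stripB_prime_dvd p q hp2 hq hqnep m.toNat m (by omega) hqm
        · intro h'
          exact (htrans q hq hq0 hqd).mpr (h'.trans hsd)
    · -- p does not divide m: next candidate
      have hpltm : p < m := by nlinarith
      apply ih m (p + 1) (by omega) hm1 (by omega) hmn ?_ htrans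
      intro q hq hq0 hqm
      have hge := hminf q hq hq0 hqm
      have hne : q ≠ p := by
        rintro rfl
        exact hmod ((PySem.Int.mod_eq_zero_iff_dvd m q).mpr hqm)
      omega
    · -- loop exit: m is prime, and it is the only prime divisor left
      rcases hret with ⟨hm2', hdm⟩
      have hm_prime : Prime m := exit_prime m p (by omega) (lt_of_not_ge hg) hp2 hminf
      right
      refine ⟨hdm, Int.le_of_dvd (by omega) hmn,
        ⟨(isPrimeA_iff m).mpr ⟨by omega, hm_prime⟩, (PySem.Int.mod_eq_zero_iff_dvd n m).mpr hmn⟩, ?_⟩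
      rintro q h1 h2 ⟨hq1, hq2⟩
      obtain ⟨hq2le, hqp⟩ := (isPrimeA_iff q).mp hq1
      have hqm : q ∣ m := (htrans q hqp (by omega) h1).mp ((PySem.Int.mod_eq_zero_iff_dvd n q).mp hq2)
      have := prime_dvd_prime_eq q m hqp hm_prime (by omega) (by omega) hqm
      omega
    · -- loop exit, nothing left above d: -1
      left
      refine ⟨rfl, ?_⟩
      rintro q h1 h2 ⟨hq1, hq2⟩
      obtain ⟨hq2le, hqp⟩ := (isPrimeA_iff q).mp hq1
      have hqm : q ∣ m := (htrans q hqp (by omega) h1).mp ((PySem.Int.mod_eq_zero_iff_dvd n q).mp hq2)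
      by_cases hm2 : 2 ≤ m
      · have hm_prime : Prime m := exit_prime m p hm2 (lt_of_not_ge hg) hp2 hminf
        have := prime_dvd_prime_eq q m hqp hm_prime (by omega) (by omega) hqm
        omega
      · have := Int.le_of_dvd (by omega : (0:Int) < m) hqm
        omega

theorem ans_B (n d : Int) : Ans n d (nextPrimeDiv_alt n d) := by
  unfold nextPrimeDiv_alt
  split_ifs with h
  · left
    refine ⟨rfl, ?_⟩
    rintro q h1 h2 ⟨hg1, -⟩
    have := isPrimeA_two_le hg1
    omega
  · exact bLoopF_ans n d (by omega) ((n - 2).toNat + 1) n 2 (by omega) (by omega) (by omega)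
      dvd_rfl (fun q hq hq0 _ => two_le_of_prime_pos q hq hq0) (fun q _ _ _ => Iff.rfl)

-- ===== VERDICT (by name: the statement is the Claim_ definition above) =====
theorem nextPrimeDiv_spec : Claim_equal_nextPrimeDiv := by
  intro n d _
  unfold Spec_nextPrimeDiv
  exact Ans_unique (ans_A n d) (ans_B n d)
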